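-- pv_equiv track=rewrite | github.com/tqgminh/event_extraction | pipeline_cnn.py | make_prediction_event
-- ===== SOURCE A (Python) =====
-- def make_prediction_event(inps, sentence_ids, id2event):
--     event_ids_of_sents = []
--     event_ids_of_sent = []
--
--     for i in range(len(sentence_ids)):
--         if i == 0:
--             event_ids_of_sent = [inps[i]]
--         else:
--             if sentence_ids[i] == sentence_ids[i-1]:
--                 event_ids_of_sent.append(inps[i])
--             else:
--                 event_ids_of_sents.append(event_ids_of_sent)
--                 event_ids_of_sent = [inps[i]]
--     event_ids_of_sents.append(event_ids_of_sent)
--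
--     result = []
--     for event_ids_of_sent in event_ids_of_sents:
--         result_sent = []
--         j = 0
--         while j < len(event_ids_of_sent):
--             event_id = event_ids_of_sent[j]
--             event_type = id2event[event_id]
--             if event_type != 'O':
--                 tmp = [event_type, j]
--                 while j+1 < len(event_ids_of_sent) and event_ids_of_sent[j+1] == event_ids_of_sent[j]:
--                     j += 1
--                 tmp.append(j)
--                 result_sent.append(tuple(tmp))
--             j += 1
--         result.append(result_sent)
--
--     return result
-- ===== SOURCE B (Python) =====
-- def make_prediction_event(inps, sentence_ids, id2event):
--     """Single fused pass: maintain the current sentence's spans, a position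
--     counter reset per sentence, and the open run (id, start); flush the run
--     when the id changes, on sentence boundaries, and at the end."""
--     sents = []
--     cur = []          # spans of the current sentence's closed runs
--     pos = 0           # position of the next token within its sentence
--     run_id = None     # id of the open run (None = no open run)
--     run_start = 0     # start position of the open run
--
--     def flushed(spans):
--         if run_id is None:
--             return spans
--         event_type = id2event[run_id]
--         if event_type != 'O':
--             return spans + [(event_type, run_start, pos - 1)]
--         return spans
--
--     for i, sid in enumerate(sentence_ids):
--         if i > 0 and sid != sentence_ids[i - 1]:
--             sents.append(flushed(cur))
--             cur = []
--             pos = 0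
--             run_id = None
--         if run_id != inps[i]:
--             cur = flushed(cur)
--             run_id = inps[i]
--             run_start = pos
--         pos += 1
--     sents.append(flushed(cur))
--     return sents
-- ===== Notes on version B (the rewrite author's own statement) =====
-- stated objective: simpler
-- what changed: A builds per-sentence lists first and then re-scans each with a nested index/while loop to find runs; B is one fused linear pass over the tokens that keeps the open run (id, start, per-sentence position) and flushes it on id change, sentence change and end of input.
import Mathlib
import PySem

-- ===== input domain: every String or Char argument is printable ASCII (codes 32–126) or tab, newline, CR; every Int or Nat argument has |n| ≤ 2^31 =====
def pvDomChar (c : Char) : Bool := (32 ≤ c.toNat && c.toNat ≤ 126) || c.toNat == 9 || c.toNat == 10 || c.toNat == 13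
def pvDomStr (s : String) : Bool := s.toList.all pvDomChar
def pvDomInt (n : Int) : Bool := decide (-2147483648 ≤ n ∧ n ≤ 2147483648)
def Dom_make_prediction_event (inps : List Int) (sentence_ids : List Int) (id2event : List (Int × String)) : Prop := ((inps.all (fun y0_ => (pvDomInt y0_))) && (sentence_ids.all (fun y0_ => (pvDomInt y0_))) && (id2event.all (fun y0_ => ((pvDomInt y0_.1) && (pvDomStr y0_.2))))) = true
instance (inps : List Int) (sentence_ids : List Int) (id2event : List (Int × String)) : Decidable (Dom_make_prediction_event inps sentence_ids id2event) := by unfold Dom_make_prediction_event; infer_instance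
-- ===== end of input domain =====

-- B replaces A's two-phase structure (group tokens into per-sentence lists, then a
-- nested index/while scan per sentence) by ONE fused linear pass that flushes the open
-- run on id change / sentence change / end of input (objective: simpler decomposition).

-- ===== PORT A =====
-- phase-1 loop body: `for i in range(len(sentence_ids))` building (event_ids_of_sents, event_ids_of_sent).
-- Loop indices are in range under Pre_, so `List.getD i 0` is exactly Python's `xs[i]` there.
def pvA_step (inps : List Int) (sids : List Int) (st : List (List Int) × List Int) (i : Nat) :
    List (List Int) × List Int :=
  if i = 0 then (st.1, [inps.getD i 0])
  else if sids.getD i 0 = sids.getD (i - 1) 0 then (st.1, st.2 ++ [inps.getD i 0])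
  else (st.1 ++ [st.2], [inps.getD i 0])

def pvA_phase1 (inps : List Int) (sids : List Int) : List (List Int) × List Int :=
  (List.range sids.length).foldl (pvA_step inps sids) ([], [])

-- inner `while j+1 < len(..) and xs[j+1] == xs[j]: j += 1`
def pvA_runEnd (xs : List Int) (j : Nat) : Nat :=
  if h : j + 1 < xs.length ∧ xs.getD (j + 1) 0 = xs.getD j 0 then pvA_runEnd xs (j + 1) else j
termination_by xs.length - j
decreasing_by omega

theorem pvA_runEnd_le (xs : List Int) (j : Nat) : j ≤ pvA_runEnd xs j := by
  unfold pvA_runEnd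
  split
  · exact le_trans (Nat.le_succ j) (pvA_runEnd_le xs (j + 1))
  · exact le_refl j
termination_by xs.length - j
decreasing_by omega

-- outer `while j < len(event_ids_of_sent)` over one sentence (dict lookup: missing key excluded by Pre_)
def pvA_scan (d : List (Int × String)) (xs : List Int) (j : Nat) (acc : List (String × Int × Int)) :
    List (String × Int × Int) :=
  if h : j < xs.length then
    let event_type := (List.lookup (xs.getD j 0) d).getD ""
    if event_type ≠ "O" then
      let j' := pvA_runEnd xs j
      pvA_scan d xs (j' + 1) (acc ++ [(event_type, (j : Int), (j' : Int))])
    else pvA_scan d xs (j + 1) acc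
  else acc
termination_by xs.length - j
decreasing_by
  · have := pvA_runEnd_le xs j; omega
  · omega

def make_prediction_event (inps : List Int) (sentence_ids : List Int) (id2event : List (Int × String)) :
    List (List (String × Int × Int)) :=
  let st := pvA_phase1 inps sentence_ids
  let sents := st.1 ++ [st.2]
  sents.foldl (fun result s => result ++ [pvA_scan id2event s 0 []]) []

-- ===== PORT B =====
-- `flushed(spans)`: append the open run's span if its type is not 'O'
def pvB_flush (d : List (Int × String)) (run_id : Option Int) (run_start : Int) (pos : Int)
    (spans : List (String × Int × Int)) : List (String × Int × Int) :=
  match run_id with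
  | none => spans
  | some rid =>
    let event_type := (List.lookup rid d).getD ""
    if event_type ≠ "O" then spans ++ [(event_type, run_start, pos - 1)] else spans

-- the fused `for i, sid in enumerate(sentence_ids)` loop; `prev` is sentence_ids[i-1] (none at i = 0)
def pvB_go (d : List (Int × String)) : List (Int × Int) → Option Int → Option Int → Int → Int →
    List (String × Int × Int) → List (List (String × Int × Int)) → List (List (String × Int × Int))
  | [], _prev, run_id, pos, run_start, cur, sents => sents ++ [pvB_flush d run_id run_start pos cur]
  | (x, sid) :: rest, prev, run_id, pos, run_start, cur, sents =>
    let st1 :=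
      if prev ≠ none ∧ prev ≠ some sid then
        (none, (0 : Int), (0 : Int), ([] : List (String × Int × Int)),
         sents ++ [pvB_flush d run_id run_start pos cur])
      else (run_id, pos, run_start, cur, sents)
    match st1 with
    | (rid1, pos1, rs1, cur1, sents1) =>
      let st2 :=
        if rid1 ≠ some x then (some x, pos1, pvB_flush d rid1 rs1 pos1 cur1)
        else (rid1, rs1, cur1)
      match st2 with
      | (rid2, rs2, cur2) => pvB_go d rest (some sid) rid2 (pos1 + 1) rs2 cur2 sents1

def make_prediction_event_alt (inps : List Int) (sentence_ids : List Int) (id2event : List (Int × String)) :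
    List (List (String × Int × Int)) :=
  pvB_go id2event (inps.zip sentence_ids) none none 0 0 [] []

-- ===== PRECONDITION & SPEC =====
-- Pre_ is exactly where the Python A returns: enough tokens for every sentence id
-- (else IndexError) and every token id present in id2event (else KeyError).
def Pre_make_prediction_event (inps : List Int) (sentence_ids : List Int) (id2event : List (Int × String)) : Prop :=
  sentence_ids.length ≤ inps.length ∧
  ∀ x ∈ inps.take sentence_ids.length, (List.lookup x id2event).isSome = true
instance (inps : List Int) (sentence_ids : List Int) (id2event : List (Int × String)) :
    Decidable (Pre_make_prediction_event inps sentence_ids id2event) := by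
  unfold Pre_make_prediction_event; infer_instance

def pvWitness_make_prediction_event : List Int × List Int × (List (Int × String)) :=
  ([1, 1, 0, 2], [5, 5, 5, 7], [(0, "O"), (1, "Attack"), (2, "Die")])

def Spec_make_prediction_event (inps : List Int) (sentence_ids : List Int) (id2event : List (Int × String)) (out : List (List (String × Int × Int))) : Prop := out = make_prediction_event_alt inps sentence_ids id2event
instance (inps : List Int) (sentence_ids : List Int) (id2event : List (Int × String)) (out : List (List (String × Int × Int))) : Decidable (Spec_make_prediction_event inps sentence_ids id2event out) := by unfold Spec_make_prediction_event; infer_instance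

-- ===== CLAIM (what is proved, stated in full; the proofs are below) =====
def Claim_equal_make_prediction_event : Prop := ∀ (inps : List Int) (sentence_ids : List Int) (id2event : List (Int × String)), Dom_make_prediction_event inps sentence_ids id2event → Pre_make_prediction_event inps sentence_ids id2event → Spec_make_prediction_event inps sentence_ids id2event (make_prediction_event inps sentence_ids id2event)

-- ===== LEMMAS AND PROOFS =====

-- Common reference: runs of equal ids with absolute positions, sentences split on sid change.
def pvFlush (d : List (Int × String)) (rid : Int) (rs pe : Int) : List (String × Int × Int) :=
  let et := (List.lookup rid d).getD ""
  if et ≠ "O" then [(et, rs, pe)] else []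

def pvRefGo (d : List (Int × String)) : List Int → Int → Int → Int → List (String × Int × Int)
  | [], rid, rs, pos => pvFlush d rid rs (pos - 1)
  | x :: rest, rid, rs, pos =>
    if x = rid then pvRefGo d rest rid rs (pos + 1)
    else pvFlush d rid rs (pos - 1) ++ pvRefGo d rest x pos (pos + 1)

def pvRefSpans (d : List (Int × String)) : List Int → List (String × Int × Int)
  | [] => []
  | x :: rest => pvRefGo d rest x 0 1

def pvGrp : List (Int × Int) → List (List Int)
  | [] => []
  | (x, s) :: rest =>
    (x :: (rest.takeWhile (fun p => p.2 = s)).map Prod.fst) ::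
      pvGrp (rest.dropWhile (fun p => p.2 = s))
termination_by l => l.length
decreasing_by
  have := List.length_dropWhile_le (fun p : Int × Int => decide (p.2 = s)) rest
  simp only [List.length_cons]; omega

def pvRef (d : List (Int × String)) (pairs : List (Int × Int)) : List (List (String × Int × Int)) :=
  match pairs with
  | [] => [[]]
  | _ :: _ => (pvGrp pairs).map (pvRefSpans d)

-- ---------- A-side ----------
theorem pvGetD_drop (xs : List Int) (j : Nat) (x : Int) (rest : List Int)
    (hd : xs.drop j = x :: rest) : xs.getD j 0 = x := by
  have h : xs[j]? = some x := by
    have h2 : (xs.drop j)[0]? = xs[j + 0]? := List.getElem?_drop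
    rw [hd] at h2; simpa using h2.symm
  simp [List.getD_eq_getElem?_getD, h]

def pvLead (x : Int) : List Int → Nat
  | [] => 0
  | y :: r => if y = x then pvLead x r + 1 else 0

theorem pvA_runEnd_eq (xs : List Int) (j : Nat) (x : Int) (rest : List Int)
    (hd : xs.drop j = x :: rest) : pvA_runEnd xs j = j + pvLead x rest := by
  have hj : j < xs.length := by
    by_contra hc
    simp [List.drop_eq_nil_of_le (Nat.le_of_not_lt hc)] at hd
  have hget : xs.getD j 0 = x := pvGetD_drop xs j x rest hd
  have hrest : xs.drop (j + 1) = rest := by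
    have := congrArg (List.drop 1) hd
    simpa [List.drop_drop] using this
  match rest, hd with
  | [], hd =>
    have hlen : xs.length = j + 1 := by
      have := congrArg List.length hd
      simp [List.length_drop] at this
      omega
    unfold pvA_runEnd
    rw [dif_neg (by omega)]
    simp [pvLead]
  | y :: r, hd =>
    have hlen : j + 1 < xs.length := by
      have := congrArg List.length hrest
      simp [List.length_drop] at this
      omega
    have hget1 : xs.getD (j + 1) 0 = y := pvGetD_drop xs (j + 1) y r hrest
    by_cases hy : y = x
    · unfold pvA_runEnd
      rw [dif_pos ⟨hlen, by rw [hget1, hget, hy]⟩]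
      have := pvA_runEnd_eq xs (j + 1) y r hrest
      rw [this]
      simp [pvLead, hy]
      omega
    · unfold pvA_runEnd
      rw [dif_neg (by rw [hget1, hget]; exact fun h => hy h.2)]
      simp [pvLead, hy]
termination_by xs.length - j
decreasing_by omega

theorem pvRefGo_O (d : List (Int × String)) (x : Int)
    (hO : (List.lookup x d).getD "" = "O") :
    ∀ (rest : List Int) (rs rs' pos : Int), pvRefGo d rest x rs pos = pvRefGo d rest x rs' pos := by
  intro rest
  induction rest with
  | nil => intro rs rs' pos; simp [pvRefGo, pvFlush, hO]
  | cons y r ih =>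
    intro rs rs' pos
    by_cases hy : y = x
    · subst hy
      simp only [pvRefGo, if_pos rfl]
      exact ih rs rs' (pos + 1)
    · simp [pvRefGo, hy, pvFlush, hO]

theorem pvRefGo_strip (d : List (Int × String)) :
    ∀ (rest : List Int) (x : Int) (rs pos : Int),
      pvRefGo d rest x rs pos =
        pvFlush d x rs (pos + (pvLead x rest : Int) - 1) ++
          (match rest.drop (pvLead x rest) with
           | [] => []
           | y :: r => pvRefGo d r y (pos + (pvLead x rest : Int)) (pos + (pvLead x rest : Int) + 1)) := by
  intro rest
  induction rest with
  | nil => intro x rs pos; simp [pvLead, pvRefGo]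
  | cons y r ih =>
    intro x rs pos
    by_cases hy : y = x
    · subst hy
      simp only [pvRefGo, if_pos rfl, pvLead, if_pos rfl]
      rw [ih y rs (pos + 1)]
      have h1 : pos + 1 + (pvLead y r : Int) = pos + ((pvLead y r : Nat) + 1 : Nat) := by
        push_cast; ring
      rw [h1]
      simp [List.drop]
    · simp [pvRefGo, hy, pvLead]

def pvSpansFrom (d : List (Int × String)) (xs : List Int) (j : Nat) : List (String × Int × Int) :=
  match xs.drop j with
  | [] => []
  | x :: rest => pvRefGo d rest x (j : Int) ((j : Int) + 1)

theorem pvA_scan_eq (d : List (Int × String)) :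
    ∀ (fuel : Nat) (xs : List Int) (j : Nat) (acc : List (String × Int × Int)),
      xs.length - j ≤ fuel →
      pvA_scan d xs j acc = acc ++ pvSpansFrom d xs j := by
  intro fuel
  induction fuel with
  | zero =>
    intro xs j acc hf
    have hj : xs.length ≤ j := by omega
    unfold pvA_scan
    rw [dif_neg (by omega)]
    simp [pvSpansFrom, List.drop_eq_nil_of_le hj]
  | succ n ih =>
    intro xs j acc hf
    by_cases hj : j < xs.length
    · obtain ⟨x, rest, hd⟩ : ∃ x rest, xs.drop j = x :: rest := by
        cases h : xs.drop j with
        | nil =>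
          exfalso
          have := congrArg List.length h
          simp [List.length_drop] at this
          omega
        | cons a b => exact ⟨a, b, rfl⟩
      have hget : xs.getD j 0 = x := pvGetD_drop xs j x rest hd
      have hrest : xs.drop (j + 1) = rest := by
        have := congrArg (List.drop 1) hd
        simpa [List.drop_drop] using this
      unfold pvA_scan
      rw [dif_pos hj]
      simp only [hget]
      by_cases hO : (List.lookup x d).getD "" = "O"
      · rw [if_neg (by simp [hO])]
        rw [ih xs (j + 1) acc (by omega)]
        congr 1
        -- pvSpansFrom d xs (j+1) = pvSpansFrom d xs j  when xs[j] has type "O"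
        simp only [pvSpansFrom, hd, hrest]
        cases rest with
        | nil => simp [pvRefGo, pvFlush, hO]
        | cons y r =>
          by_cases hy : y = x
          · subst hy
            simp only [pvRefGo, if_pos rfl]
            rw [pvRefGo_O d y hO r (j : Int) ((j : Int) + 1) ((j : Int) + 1 + 1)]
            norm_cast
          · simp only [pvRefGo, if_neg hy, pvFlush, hO]
            simp [hO]
      · rw [if_pos (by simp [hO])]
        have hre : pvA_runEnd xs j = j + pvLead x rest := pvA_runEnd_eq xs j x rest hd
        rw [hre]
        have hIH : ∀ acc2, pvA_scan d xs (j + pvLead x rest + 1) acc2 = acc2 ++ pvSpansFrom d xs (j + pvLead x rest + 1) :=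
          fun acc2 => ih xs (j + pvLead x rest + 1) acc2 (by omega)
        rw [hIH]
        rw [List.append_assoc]
        congr 1
        -- [(et, j, j+L)] ++ pvSpansFrom xs (j+L+1) = pvSpansFrom xs j
        simp only [pvSpansFrom, hd]
        rw [pvRefGo_strip d rest x (j : Int) ((j : Int) + 1)]
        have hdropeq : xs.drop (j + pvLead x rest + 1) = rest.drop (pvLead x rest) := by
          rw [← hrest, List.drop_drop]
          congr 1
          omega
        rw [hdropeq]
        have harith1 : (j : Int) + 1 + (pvLead x rest : Int) - 1 = ((j + pvLead x rest : Nat) : Int) := by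
          push_cast; ring
        have harith2 : (j : Int) + 1 + (pvLead x rest : Int) = ((j + pvLead x rest + 1 : Nat) : Int) := by
          push_cast; ring
        rw [harith1, harith2]
        simp only [pvFlush, if_pos (by simpa using hO)]
    · unfold pvA_scan
      rw [dif_neg hj]
      have hnil : xs.drop j = [] := List.drop_eq_nil_of_le (by omega)
      simp [pvSpansFrom, hnil]

theorem pvA_scan_refSpans (d : List (Int × String)) (xs : List Int) :
    pvA_scan d xs 0 [] = pvRefSpans d xs := by
  rw [pvA_scan_eq d xs.length xs 0 [] (by omega)]
  cases xs with
  | nil => simp [pvSpansFrom, pvRefSpans]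
  | cons x rest => simp [pvSpansFrom, pvRefSpans]

-- ---------- A-side grouping ----------
def pvGGo : List (Int × Int) → Int → List (List Int) × List Int → List (List Int) × List Int
  | [], _, st => st
  | (x, s) :: rest, prev, st =>
    if s = prev then pvGGo rest s (st.1, st.2 ++ [x]) else pvGGo rest s (st.1 ++ [st.2], [x])

def pvGState : List (Int × Int) → List (List Int) × List Int
  | [] => ([], [])
  | (x, s) :: rest => pvGGo rest s ([], [x])

def pvLastSid (ps : List (Int × Int)) (dflt : Int) : Int := ((ps.getLast?).map Prod.snd).getD dflt

theorem pvGGo_snoc (x s : Int) :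
    ∀ (rest : List (Int × Int)) (prev : Int) (st : List (List Int) × List Int),
      pvGGo (rest ++ [(x, s)]) prev st =
        (let st' := pvGGo rest prev st
         if s = pvLastSid rest prev then (st'.1, st'.2 ++ [x]) else (st'.1 ++ [st'.2], [x])) := by
  intro rest
  induction rest with
  | nil => intro prev st; simp [pvGGo, pvLastSid]
  | cons p r ih =>
    intro prev st
    obtain ⟨y, t⟩ := p
    by_cases ht : t = prev
    · simp only [List.cons_append, pvGGo, if_pos ht]
      rw [ih t (st.1, st.2 ++ [y])]
      cases r with
      | nil => simp [pvLastSid]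
      | cons q r' =>
        cases hlast : (q :: r').getLast? with
        | none => simp [List.getLast?_eq_none_iff] at hlast
        | some pl => simp [pvLastSid, hlast]
    · simp only [List.cons_append, pvGGo, if_neg ht]
      rw [ih t (st.1 ++ [st.2], [y])]
      cases r with
      | nil => simp [pvLastSid]
      | cons q r' =>
        cases hlast : (q :: r').getLast? with
        | none => simp [List.getLast?_eq_none_iff] at hlast
        | some pl => simp [pvLastSid, hlast]

theorem pvGState_snoc (ps : List (Int × Int)) (x s : Int) (hne : ps ≠ []) :
    pvGState (ps ++ [(x, s)]) =
      (let st' := pvGState ps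
       if s = pvLastSid ps 0 then (st'.1, st'.2 ++ [x]) else (st'.1 ++ [st'.2], [x])) := by
  cases ps with
  | nil => exact absurd rfl hne
  | cons p r =>
    obtain ⟨y, t⟩ := p
    simp only [List.cons_append, pvGState]
    rw [pvGGo_snoc x s r t ([], [y])]
    cases r with
    | nil => simp [pvLastSid]
    | cons q r' =>
      cases hlast : (q :: r').getLast? with
      | none => simp [List.getLast?_eq_none_iff] at hlast
      | some pl => simp [pvLastSid, hlast]

-- fold over range = pvGState over the zipped prefix
theorem pvA_phase1_take (inps sids : List Int) (hlen : sids.length ≤ inps.length) :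
    ∀ n, n ≤ sids.length →
      (List.range n).foldl (pvA_step inps sids) ([], []) = pvGState ((inps.zip sids).take n) := by
  have hzlen : (inps.zip sids).length = sids.length := by simp [List.length_zip]; omega
  intro n
  induction n with
  | zero => intro _; simp [pvGState]
  | succ m ih =>
    intro hm
    have hm' : m < sids.length := by omega
    have hmz : m < (inps.zip sids).length := by omega
    have hzget : (inps.zip sids)[m] = (inps.getD m 0, sids.getD m 0) := by
      have h1 : (inps.zip sids)[m] = (inps[m]'(by omega), sids[m]'(by omega)) := by
        simp [List.getElem_zip]
      rw [h1]
      simp [List.getD_eq_getElem?_getD, List.getElem?_eq_getElem, hm']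
      simp [List.getElem?_eq_getElem (show m < inps.length by omega)]
    rw [List.range_succ, List.foldl_append, ih (by omega)]
    have htake : (inps.zip sids).take (m + 1) = (inps.zip sids).take m ++ [(inps.getD m 0, sids.getD m 0)] := by
      rw [List.take_add_one]
      simp [List.getElem?_eq_getElem hmz, hzget]
    rw [htake]
    simp only [List.foldl_cons, List.foldl_nil]
    by_cases hm0 : m = 0
    · subst hm0
      simp [pvA_step, pvGState, pvGGo]
    · have hmpos : 0 < m := Nat.pos_of_ne_zero hm0
      have htne : (inps.zip sids).take m ≠ [] := by
        apply List.ne_nil_of_length_pos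
        simp only [List.length_take]
        omega
      rw [pvGState_snoc _ _ _ htne]
      have hlast : pvLastSid ((inps.zip sids).take m) 0 = sids.getD (m - 1) 0 := by
        unfold pvLastSid
        have h1 : ((inps.zip sids).take m).getLast? = some ((inps.zip sids)[m - 1]) := by
          have hlen2 : ((inps.zip sids).take m).length = m := by
            simp only [List.length_take]; omega
          rw [List.getLast?_eq_getElem?, hlen2]
          have hlt : m - 1 < ((inps.zip sids).take m).length := by omega
          rw [List.getElem?_eq_getElem hlt]
          congr 1
          exact List.getElem_take
        have hzget' : (inps.zip sids)[m - 1] = (inps.getD (m - 1) 0, sids.getD (m - 1) 0) := by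
          have h2 : (inps.zip sids)[m - 1] = (inps[m - 1]'(by omega), sids[m - 1]'(by omega)) := by
            simp [List.getElem_zip]
          rw [h2]
          simp [List.getD_eq_getElem?_getD,
                List.getElem?_eq_getElem (show m - 1 < sids.length by omega),
                List.getElem?_eq_getElem (show m - 1 < inps.length by omega)]
        rw [h1, hzget']
        simp
      unfold pvA_step
      rw [if_neg hm0, hlast]

-- pvGGo (with final append of the open sentence) computes the takeWhile/dropWhile grouping
def pvConsHd (c : List Int) : List (List Int) → List (List Int)
  | [] => [c]
  | h :: t => (c ++ h) :: t

theorem pvGGo_grp :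
    ∀ (rest : List (Int × Int)) (s : Int) (S : List (List Int)) (c : List Int),
      (pvGGo rest s (S, c)).1 ++ [(pvGGo rest s (S, c)).2] =
        S ++ pvConsHd c
          (((rest.takeWhile (fun p => p.2 = s)).map Prod.fst) ::
            pvGrp (rest.dropWhile (fun p => p.2 = s))) := by
  intro rest
  induction rest with
  | nil => intro s S c; simp [pvGGo, pvConsHd, pvGrp]
  | cons p r ih =>
    intro s S c
    obtain ⟨x, t⟩ := p
    by_cases ht : t = s
    · subst ht
      simp only [pvGGo, reduceIte]
      rw [ih t S (c ++ [x])]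
      simp [pvConsHd]
    · simp only [pvGGo, if_neg ht]
      rw [ih t (S ++ [c]) [x]]
      have hgrp : pvGrp ((x, t) :: r) =
          (x :: (r.takeWhile (fun p => p.2 = t)).map Prod.fst) ::
            pvGrp (r.dropWhile (fun p => p.2 = t)) := by
        simp [pvGrp]
      simp [List.takeWhile_cons, List.dropWhile_cons, ht, pvConsHd, hgrp]

theorem pvA_eq_ref (inps sids : List Int) (d : List (Int × String)) (hlen : sids.length ≤ inps.length) :
    make_prediction_event inps sids d = pvRef d (inps.zip sids) := by
  unfold make_prediction_event
  have hfold : ∀ (sents : List (List Int)),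
      sents.foldl (fun result s => result ++ [pvA_scan d s 0 []]) [] =
        sents.map (fun s => pvA_scan d s 0 []) := by
    intro sents
    simpa using PySem.List.foldl_append_singleton_eq_map (fun s => pvA_scan d s 0 []) sents []
  have hp1 : pvA_phase1 inps sids = pvGState (inps.zip sids) := by
    unfold pvA_phase1
    rw [pvA_phase1_take inps sids hlen sids.length (le_refl _)]
    congr 1
    apply List.take_of_length_le
    simp only [List.length_zip]
    omega
  simp only [hp1, hfold]
  cases hz : inps.zip sids with
  | nil =>
    simp only [pvGState, pvRef, List.nil_append, List.map_cons, List.map_nil]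
    rw [pvA_scan_refSpans]
    simp [pvRefSpans]
  | cons p r =>
    obtain ⟨x, s⟩ := p
    have hsents : (pvGState ((x, s) :: r)).1 ++ [(pvGState ((x, s) :: r)).2] = pvGrp ((x, s) :: r) := by
      simp only [pvGState]
      rw [pvGGo_grp r s [] [x]]
      have hgrp : pvGrp ((x, s) :: r) =
          (x :: (r.takeWhile (fun p => p.2 = s)).map Prod.fst) ::
            pvGrp (r.dropWhile (fun p => p.2 = s)) := by
        simp [pvGrp]
      simp [pvConsHd, hgrp]
  -- map over sentences, each scan = refSpans
    rw [hsents]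
    simp only [pvRef]
    apply List.map_congr_left
    intro a _
    exact pvA_scan_refSpans d a

-- ---------- B-side ----------
def pvConsHead (c : List (String × Int × Int)) :
    List (List (String × Int × Int)) → List (List (String × Int × Int))
  | [] => [c]
  | h :: t => (c ++ h) :: t

def pvBRest (d : List (Int × String)) : List (Int × Int) → Int → Int → Int → Int →
    List (List (String × Int × Int))
  | [], _s, rid, pos, rs => [pvFlush d rid rs (pos - 1)]
  | (x, sid) :: rest, s, rid, pos, rs =>
    if sid = s then
      if x = rid then pvBRest d rest s rid (pos + 1) rs
      else pvConsHead (pvFlush d rid rs (pos - 1)) (pvBRest d rest s x (pos + 1) pos)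
    else pvFlush d rid rs (pos - 1) :: pvBRest d rest sid x 1 0

theorem pvBRest_ne_nil (d : List (Int × String)) :
    ∀ (rest : List (Int × Int)) (s rid pos rs : Int), pvBRest d rest s rid pos rs ≠ [] := by
  intro rest
  induction rest with
  | nil => intro s rid pos rs; simp [pvBRest]
  | cons p r ih =>
    intro s rid pos rs
    obtain ⟨x, sid⟩ := p
    by_cases hs : sid = s
    · by_cases hx : x = rid
      · simpa [pvBRest, hs, hx] using ih s rid (pos + 1) rs
      · simp only [pvBRest, if_pos hs, if_neg hx]
        cases h : pvBRest d r s x (pos + 1) pos with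
        | nil => simp [pvConsHead]
        | cons a b => simp [pvConsHead]
    · simp [pvBRest, hs]

theorem pvB_flush_some (d : List (Int × String)) (rid : Int) (rs pos : Int)
    (cur : List (String × Int × Int)) :
    pvB_flush d (some rid) rs pos cur = cur ++ pvFlush d rid rs (pos - 1) := by
  simp only [pvB_flush, pvFlush]
  split <;> simp

theorem pvConsHead_consHead (c f : List (String × Int × Int)) (l : List (List (String × Int × Int))) :
    pvConsHead c (pvConsHead f l) = pvConsHead (c ++ f) l := by
  cases l <;> simp [pvConsHead]

theorem pvB_go_eq (d : List (Int × String)) :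
    ∀ (rest : List (Int × Int)) (s rid : Int) (pos rs : Int)
      (cur : List (String × Int × Int)) (sents : List (List (String × Int × Int))),
      pvB_go d rest (some s) (some rid) pos rs cur sents =
        sents ++ pvConsHead cur (pvBRest d rest s rid pos rs) := by
  intro rest
  induction rest with
  | nil =>
    intro s rid pos rs cur sents
    simp [pvB_go, pvB_flush_some, pvBRest, pvConsHead]
  | cons p r ih =>
    intro s rid pos rs cur sents
    obtain ⟨x, sid⟩ := p
    by_cases hs : sid = s
    · subst hs
      have hb : ¬ ((some sid : Option Int) ≠ none ∧ (some sid : Option Int) ≠ some sid) := by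
        simp
      simp only [pvB_go, if_neg hb]
      by_cases hx : x = rid
      · have hr : ¬ ((some rid : Option Int) ≠ some x) := by simp [hx]
        simp only [if_neg hr]
        rw [ih sid rid (pos + 1) rs cur sents]
        simp [pvBRest, hx]
      · have hr : (some rid : Option Int) ≠ some x := by
          intro h
          exact hx ((Option.some.inj h).symm)
        simp only [if_pos hr]
        rw [ih sid x (pos + 1) pos (pvB_flush d (some rid) rs pos cur) sents]
        rw [pvB_flush_some]
        simp only [pvBRest, reduceIte, if_neg hx]
        rw [pvConsHead_consHead]
    · have hb : ((some s : Option Int) ≠ none ∧ (some s : Option Int) ≠ some sid) := by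
        refine ⟨by simp, ?_⟩
        intro h
        exact hs ((Option.some.inj h).symm)
      simp only [pvB_go, if_pos hb]
      have hr : (none : Option Int) ≠ some x := by simp
      simp only [if_pos hr]
      rw [show ((0:Int) + 1) = 1 by norm_num]
      rw [ih sid x 1 0 (pvB_flush d none 0 0 []) (sents ++ [pvB_flush d (some rid) rs pos cur])]
      rw [pvB_flush_some]
      simp only [pvB_flush]
      simp only [pvBRest, if_neg hs]
      cases h : pvBRest d r sid x 1 0 with
      | nil => exact absurd h (pvBRest_ne_nil d r sid x 1 0)
      | cons a b =>
        simp [pvConsHead]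

theorem pvBRest_eq_ref (d : List (Int × String)) :
    ∀ (rest : List (Int × Int)) (s rid : Int) (pos rs : Int),
      pvBRest d rest s rid pos rs =
        pvRefGo d ((rest.takeWhile (fun p => p.2 = s)).map Prod.fst) rid rs pos ::
          (pvGrp (rest.dropWhile (fun p => p.2 = s))).map (pvRefSpans d) := by
  intro rest
  induction rest with
  | nil => intro s rid pos rs; simp [pvBRest, pvRefGo, pvGrp]
  | cons p r ih =>
    intro s rid pos rs
    obtain ⟨x, sid⟩ := p
    by_cases hs : sid = s
    · subst hs
      simp only [List.takeWhile_cons, List.dropWhile_cons, decide_true, if_true, List.map_cons]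
      by_cases hx : x = rid
      · simp only [pvBRest, reduceIte, if_pos hx, pvRefGo]
        exact ih sid rid (pos + 1) rs
      · simp only [pvBRest, reduceIte, if_neg hx, pvRefGo]
        rw [ih sid x (pos + 1) pos]
        simp [pvConsHead]
    · simp only [pvBRest, if_neg hs]
      rw [ih sid x 1 0]
      have hgrp : pvGrp ((x, sid) :: r) =
          (x :: (r.takeWhile (fun p => p.2 = sid)).map Prod.fst) ::
            pvGrp (r.dropWhile (fun p => p.2 = sid)) := by
        simp [pvGrp]
      simp [hs, hgrp, pvRefGo, pvRefSpans]

theorem pvB_eq_ref (inps sids : List Int) (d : List (Int × String)) :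
    make_prediction_event_alt inps sids d = pvRef d (inps.zip sids) := by
  unfold make_prediction_event_alt
  cases hz : inps.zip sids with
  | nil => simp [pvB_go, pvB_flush, pvRef]
  | cons p r =>
    obtain ⟨x, s⟩ := p
    have hb : ¬ ((none : Option Int) ≠ none ∧ (none : Option Int) ≠ some s) := by simp
    simp only [pvB_go, if_neg hb]
    have hr : (none : Option Int) ≠ some x := by simp
    simp only [if_pos hr]
    rw [show ((0:Int) + 1) = 1 by norm_num]
    rw [pvB_go_eq d r s x 1 0 (pvB_flush d none 0 0 []) []]
    simp only [pvB_flush, List.nil_append]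
    rw [pvBRest_eq_ref d r s x 1 0]
    simp only [pvConsHead, List.nil_append]
    have hgrp : pvGrp ((x, s) :: r) =
        (x :: (r.takeWhile (fun p => p.2 = s)).map Prod.fst) ::
          pvGrp (r.dropWhile (fun p => p.2 = s)) := by
      simp [pvGrp]
    simp [pvRef, hgrp, pvRefSpans]

-- ===== VERDICT (by name: the statement is the Claim_ definition above) =====
theorem make_prediction_event_spec : Claim_equal_make_prediction_event := by
  intro inps sids d _hdom hpre
  unfold Spec_make_prediction_event
  rw [pvA_eq_ref inps sids d hpre.1, pvB_eq_ref inps sids d]
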